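-- pv_equiv track=rewrite | github.com/akhandsingh17/assignments | codingexercise/PairFourElementSum.py | PairFourElementSum
-- ===== SOURCE A (Python) =====
-- def PairFourElementSum(ary):
--
--     dict={}
--
--     fnl_lst=[]
--     for i in range(0,len(ary)):
--         for j in range(i+1,len(ary)):
--
--             sum=ary[i]+ary[j]
--
--             if sum in dict.keys():
--                 val=dict[sum]
--                 tup=(val[0],val[1],ary[i],ary[j])
--                 if len(set(tup))==4:
--                     fnl_lst.append(tup)
--             else:
--                 tup=(ary[i],ary[j])
--                 dict[sum]=tup
--
--     return fnl_lst
-- ===== SOURCE B (Python) =====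
-- def PairFourElementSum(ary):
--     n = len(ary)
--     # pass 1: for each pair-sum remember the index pair (i, j) of the FIRST
--     # i<j pair (in scan order) producing that sum; never overwrite
--     first = {}
--     for i in range(n):
--         for j in range(i + 1, n):
--             s = ary[i] + ary[j]
--             if s not in first:
--                 first[s] = (i, j)
--     # pass 2: every later pair with an already-seen sum pairs up with the
--     # first pair of that sum; keep only quadruples of 4 distinct values
--     out = []
--     for i in range(n):
--         for j in range(i + 1, n):
--             s = ary[i] + ary[j]
--             fi, fj = first[s]
--             if (fi, fj) != (i, j):
--                 tup = (ary[fi], ary[fj], ary[i], ary[j])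
--                 if len(set(tup)) == 4:
--                     out.append(tup)
--     return out
-- ===== Notes on version B (the rewrite author's own statement) =====
-- stated objective: alternative
-- what changed: Instead of one interleaved scan mutating a sum->value-pair dict while emitting, B makes two passes: it first builds a complete sum->first-index-pair table (never overwritten), then rescans all i<j pairs and emits against that table whenever the stored first pair's indices differ from the current pair.
import Mathlib
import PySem

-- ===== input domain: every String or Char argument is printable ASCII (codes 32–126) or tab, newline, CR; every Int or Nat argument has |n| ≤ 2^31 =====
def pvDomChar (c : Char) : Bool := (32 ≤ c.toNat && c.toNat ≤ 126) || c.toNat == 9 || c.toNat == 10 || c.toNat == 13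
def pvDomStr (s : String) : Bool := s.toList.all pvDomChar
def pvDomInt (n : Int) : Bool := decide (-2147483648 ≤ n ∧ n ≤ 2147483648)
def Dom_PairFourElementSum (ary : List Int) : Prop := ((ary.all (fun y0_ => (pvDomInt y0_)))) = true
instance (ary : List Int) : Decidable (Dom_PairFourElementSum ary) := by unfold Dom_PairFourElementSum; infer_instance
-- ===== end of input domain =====

-- B re-implements A as two passes (build the complete sum -> first index pair table, then rescan
-- and emit against it) instead of A's single interleaved scan mutating a sum -> value pair dict.

-- ===== PORT A =====
-- ary[i] for i drawn from range(len(ary)) is always in range: pyGetD is exact here.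
def PairFourElementSum (ary : List Int) : List (Int × Int × Int × Int) :=
  let n : Int := ary.length
  let res :=
    (PySem.List.pyRange 0 n 1).foldl (fun (st : PySem.Dict Int (Int × Int) × List (Int × Int × Int × Int)) i =>
      (PySem.List.pyRange (i + 1) n 1).foldl (fun st j =>
        let ai := PySem.List.pyGetD ary i 0
        let aj := PySem.List.pyGetD ary j 0
        let s := ai + aj
        match st.1.get? s with
        | some val =>
            if PySem.Set.len (PySem.Set.ofList [val.1, val.2, ai, aj]) = 4 then
              (st.1, st.2 ++ [(val.1, val.2, ai, aj)])
            else st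
        | none => (st.1.insert s (ai, aj), st.2)) st)
      (PySem.Dict.empty, [])
  res.2

-- ===== PORT B =====
-- first[s] in pass 2 always exists (the sum of the current pair was recorded in pass 1),
-- so the `none` branch is unreachable; it returns `out` unchanged.
def PairFourElementSum_alt (ary : List Int) : List (Int × Int × Int × Int) :=
  let n : Int := ary.length
  let first : PySem.Dict Int (Int × Int) :=
    (PySem.List.pyRange 0 n 1).foldl (fun d i =>
      (PySem.List.pyRange (i + 1) n 1).foldl (fun d j =>
        let s := PySem.List.pyGetD ary i 0 + PySem.List.pyGetD ary j 0
        match d.get? s with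
        | some _ => d
        | none => d.insert s (i, j)) d)
      PySem.Dict.empty
  (PySem.List.pyRange 0 n 1).foldl (fun out i =>
    (PySem.List.pyRange (i + 1) n 1).foldl (fun out j =>
      let ai := PySem.List.pyGetD ary i 0
      let aj := PySem.List.pyGetD ary j 0
      let s := ai + aj
      match first.get? s with
      | some p =>
          if p ≠ (i, j) then
            let tup := (PySem.List.pyGetD ary p.1 0, PySem.List.pyGetD ary p.2 0, ai, aj)
            if PySem.Set.len (PySem.Set.ofList [tup.1, tup.2.1, ai, aj]) = 4 then
              out ++ [tup]
            else out
          else out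
      | none => out) out)
    []

-- ===== PRECONDITION & SPEC =====
def Spec_PairFourElementSum (ary : List Int) (out : List (Int × Int × Int × Int)) : Prop := out = PairFourElementSum_alt ary
instance (ary : List Int) (out : List (Int × Int × Int × Int)) : Decidable (Spec_PairFourElementSum ary out) := by unfold Spec_PairFourElementSum; infer_instance

-- ===== CLAIM (what is proved, stated in full; the proofs are below) =====
def Claim_equal_PairFourElementSum : Prop := ∀ (ary : List Int), Dom_PairFourElementSum ary → Spec_PairFourElementSum ary (PairFourElementSum ary)

-- ===== LEMMAS AND PROOFS =====

-- the list of index pairs (i, j) with 0 <= i < j < n, in scan order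
def pvPairs (n : Int) : List (Int × Int) :=
  (PySem.List.pyRange 0 n 1).flatMap (fun i => (PySem.List.pyRange (i + 1) n 1).map (fun j => (i, j)))

def pvSum (ary : List Int) (p : Int × Int) : Int :=
  PySem.List.pyGetD ary p.1 0 + PySem.List.pyGetD ary p.2 0

-- A's loop body, uncurried over the pair (def-eq to the port's inner body)
def pvStepA (ary : List Int) (st : PySem.Dict Int (Int × Int) × List (Int × Int × Int × Int))
    (p : Int × Int) : PySem.Dict Int (Int × Int) × List (Int × Int × Int × Int) :=
  match st.1.get? (pvSum ary p) with
  | some val =>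
      if PySem.Set.len (PySem.Set.ofList
          [val.1, val.2, PySem.List.pyGetD ary p.1 0, PySem.List.pyGetD ary p.2 0]) = 4 then
        (st.1, st.2 ++ [(val.1, val.2, PySem.List.pyGetD ary p.1 0, PySem.List.pyGetD ary p.2 0)])
      else st
  | none => (st.1.insert (pvSum ary p) (PySem.List.pyGetD ary p.1 0, PySem.List.pyGetD ary p.2 0), st.2)

-- B's pass-1 body
def pvStepF (ary : List Int) (d : PySem.Dict Int (Int × Int)) (p : Int × Int) :
    PySem.Dict Int (Int × Int) :=
  match d.get? (pvSum ary p) with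
  | some _ => d
  | none => d.insert (pvSum ary p) p

-- B's pass-2 body
def pvStepB (ary : List Int) (F : PySem.Dict Int (Int × Int))
    (out : List (Int × Int × Int × Int)) (p : Int × Int) : List (Int × Int × Int × Int) :=
  match F.get? (pvSum ary p) with
  | some q =>
      if q ≠ p then
        if PySem.Set.len (PySem.Set.ofList [PySem.List.pyGetD ary q.1 0, PySem.List.pyGetD ary q.2 0,
            PySem.List.pyGetD ary p.1 0, PySem.List.pyGetD ary p.2 0]) = 4 then
          out ++ [(PySem.List.pyGetD ary q.1 0, PySem.List.pyGetD ary q.2 0,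
            PySem.List.pyGetD ary p.1 0, PySem.List.pyGetD ary p.2 0)]
        else out
      else out
  | none => out

-- flattening a nested for-loop into a fold over the pair list
theorem pv_flatten {σ α β : Type} (outer : List α) (f : α → List β) (g : σ → α × β → σ) (st : σ) :
    outer.foldl (fun st i => (f i).foldl (fun st j => g st (i, j)) st) st
      = (outer.flatMap (fun i => (f i).map (fun j => (i, j)))).foldl g st := by
  induction outer generalizing st with
  | nil => rfl
  | cons a l ih => simp only [List.flatMap_cons, List.foldl_append, List.foldl_map, List.foldl_cons, ih]

theorem pv_A_eq (ary : List Int) :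
    PairFourElementSum ary
      = ((pvPairs (ary.length : Int)).foldl (pvStepA ary) (PySem.Dict.empty, [])).2 := by
  show ((PySem.List.pyRange 0 (ary.length : Int) 1).foldl
      (fun st i => (PySem.List.pyRange (i + 1) (ary.length : Int) 1).foldl
        (fun st j => pvStepA ary st (i, j)) st) (PySem.Dict.empty, [])).2 = _
  rw [pv_flatten]
  rfl

theorem pv_B_eq (ary : List Int) :
    PairFourElementSum_alt ary
      = (pvPairs (ary.length : Int)).foldl
          (pvStepB ary ((pvPairs (ary.length : Int)).foldl (pvStepF ary) PySem.Dict.empty)) [] := by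
  show ((PySem.List.pyRange 0 (ary.length : Int) 1).foldl
      (fun out i => (PySem.List.pyRange (i + 1) (ary.length : Int) 1).foldl
        (fun out j => pvStepB ary
          ((PySem.List.pyRange 0 (ary.length : Int) 1).foldl
            (fun d i => (PySem.List.pyRange (i + 1) (ary.length : Int) 1).foldl
              (fun d j => pvStepF ary d (i, j)) d) PySem.Dict.empty) out (i, j)) out) []) = _
  rw [pv_flatten, pv_flatten]
  rfl

-- step lemmas: each loop body, with the dict lookup resolved
theorem pvStepA_of_some (ary : List Int) (st : PySem.Dict Int (Int × Int) × List (Int × Int × Int × Int))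
    (p : Int × Int) (v : Int × Int) (h : st.1.get? (pvSum ary p) = some v) :
    pvStepA ary st p
      = if PySem.Set.len (PySem.Set.ofList
            [v.1, v.2, PySem.List.pyGetD ary p.1 0, PySem.List.pyGetD ary p.2 0]) = 4 then
          (st.1, st.2 ++ [(v.1, v.2, PySem.List.pyGetD ary p.1 0, PySem.List.pyGetD ary p.2 0)])
        else st := by
  unfold pvStepA; rw [h]

theorem pvStepA_of_none (ary : List Int) (st : PySem.Dict Int (Int × Int) × List (Int × Int × Int × Int))
    (p : Int × Int) (h : st.1.get? (pvSum ary p) = none) :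
    pvStepA ary st p
      = (st.1.insert (pvSum ary p) (PySem.List.pyGetD ary p.1 0, PySem.List.pyGetD ary p.2 0), st.2) := by
  unfold pvStepA; rw [h]

theorem pvStepB_of_some (ary : List Int) (F : PySem.Dict Int (Int × Int))
    (out : List (Int × Int × Int × Int)) (p q : Int × Int) (h : F.get? (pvSum ary p) = some q) :
    pvStepB ary F out p
      = if q ≠ p then
          if PySem.Set.len (PySem.Set.ofList [PySem.List.pyGetD ary q.1 0, PySem.List.pyGetD ary q.2 0,
              PySem.List.pyGetD ary p.1 0, PySem.List.pyGetD ary p.2 0]) = 4 then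
            out ++ [(PySem.List.pyGetD ary q.1 0, PySem.List.pyGetD ary q.2 0,
              PySem.List.pyGetD ary p.1 0, PySem.List.pyGetD ary p.2 0)]
          else out
        else out := by
  unfold pvStepB; rw [h]

-- an insert-if-absent fold looks up to the FIRST element of the list with the given sum
theorem pv_firstFold_get? (ary : List Int) (l : List (Int × Int)) (d : PySem.Dict Int (Int × Int)) (s : Int) :
    (l.foldl (pvStepF ary) d).get? s
      = (d.get? s).or (l.find? (fun p => pvSum ary p == s)) := by
  induction l generalizing d with
  | nil => simp
  | cons p l ih =>
    simp only [List.foldl_cons]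
    by_cases hs : pvSum ary p = s
    · subst hs
      rw [List.find?_cons_of_pos (by simp)]
      cases hd : d.get? (pvSum ary p) with
      | some v =>
        rw [show pvStepF ary d p = d by simp [pvStepF, hd], ih, hd]
        simp
      | none =>
        rw [show pvStepF ary d p = d.insert (pvSum ary p) p by simp [pvStepF, hd], ih,
          PySem.Dict.get?_insert_self]
        simp
    · rw [List.find?_cons_of_neg (by simpa using hs)]
      cases hd : d.get? (pvSum ary p) with
      | some v => rw [show pvStepF ary d p = d by simp [pvStepF, hd], ih]
      | none =>
        rw [show pvStepF ary d p = d.insert (pvSum ary p) p by simp [pvStepF, hd], ih,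
          PySem.Dict.get?_insert_of_ne _ _ (Ne.symm hs)]

-- core: A's interleaved scan agrees with B's rescan against the full first-pair table
theorem pv_main (ary : List Int) (F : PySem.Dict Int (Int × Int)) :
    ∀ (L pre : List (Int × Int)) (d : PySem.Dict Int (Int × Int)) (out : List (Int × Int × Int × Int)),
      (pre ++ L).Nodup →
      (∀ s, d.get? s = (pre.find? (fun p => pvSum ary p == s)).map
        (fun q => (PySem.List.pyGetD ary q.1 0, PySem.List.pyGetD ary q.2 0))) →
      (∀ s, F.get? s = (pre ++ L).find? (fun p => pvSum ary p == s)) →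
      (L.foldl (pvStepA ary) (d, out)).2 = L.foldl (pvStepB ary F) out := by
  intro L
  induction L with
  | nil => intro pre d out _ _ _; rfl
  | cons p L ih =>
    intro pre d out hnd hd hF
    have hpmem : p ∉ pre := fun hmem => (List.disjoint_of_nodup_append hnd) hmem List.mem_cons_self
    have hnd' : (pre ++ [p] ++ L).Nodup := by simpa [List.append_assoc] using hnd
    have hFs : F.get? (pvSum ary p)
        = ((pre.find? (fun q => pvSum ary q == pvSum ary p)).or (some p)) := by
      rw [hF, List.find?_append, List.find?_cons_of_pos (by simp)]
    have hF' : ∀ s, F.get? s = ((pre ++ [p]) ++ L).find? (fun q => pvSum ary q == s) := by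
      intro s; rw [hF s]; simp [List.append_assoc]
    simp only [List.foldl_cons]
    cases hfind : pre.find? (fun q => pvSum ary q == pvSum ary p) with
    | some q =>
      have hq : d.get? (pvSum ary p)
          = some (PySem.List.pyGetD ary q.1 0, PySem.List.pyGetD ary q.2 0) := by
        rw [hd, hfind]; rfl
      have hqpre : q ∈ pre := List.mem_of_find?_eq_some hfind
      have hqp : q ≠ p := fun h => hpmem (h ▸ hqpre)
      have hq2 : F.get? (pvSum ary p) = some q := by rw [hFs, hfind]; rfl
      have hd' : ∀ s, d.get? s = ((pre ++ [p]).find? (fun q => pvSum ary q == s)).map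
          (fun q => (PySem.List.pyGetD ary q.1 0, PySem.List.pyGetD ary q.2 0)) := by
        intro s
        rw [hd s, List.find?_append]
        by_cases hs : pvSum ary p = s
        · subst hs; rw [hfind]; rfl
        · rw [List.find?_cons_of_neg (by simpa using hs)]
          cases pre.find? (fun q => pvSum ary q == s) <;> rfl
      rw [pvStepA_of_some ary (d, out) p _ hq, pvStepB_of_some ary F out p q hq2, if_pos hqp]
      by_cases hc : PySem.Set.len (PySem.Set.ofList [PySem.List.pyGetD ary q.1 0,
          PySem.List.pyGetD ary q.2 0, PySem.List.pyGetD ary p.1 0, PySem.List.pyGetD ary p.2 0]) = 4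
      · rw [if_pos hc, if_pos hc]
        exact ih (pre ++ [p]) d _ hnd' hd' hF'
      · rw [if_neg hc, if_neg hc]
        exact ih (pre ++ [p]) d out hnd' hd' hF'
    | none =>
      have hq : d.get? (pvSum ary p) = none := by rw [hd, hfind]; rfl
      have hq2 : F.get? (pvSum ary p) = some p := by rw [hFs, hfind]; rfl
      have hd' : ∀ s, (d.insert (pvSum ary p)
            (PySem.List.pyGetD ary p.1 0, PySem.List.pyGetD ary p.2 0)).get? s
          = ((pre ++ [p]).find? (fun q => pvSum ary q == s)).map
            (fun q => (PySem.List.pyGetD ary q.1 0, PySem.List.pyGetD ary q.2 0)) := by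
        intro s
        rw [List.find?_append]
        by_cases hs : pvSum ary p = s
        · subst hs
          rw [hfind, PySem.Dict.get?_insert_self, List.find?_cons_of_pos (by simp)]
          rfl
        · rw [PySem.Dict.get?_insert_of_ne _ _ (Ne.symm hs), hd s,
            List.find?_cons_of_neg (by simpa using hs)]
          cases pre.find? (fun q => pvSum ary q == s) <;> rfl
      rw [pvStepA_of_none ary (d, out) p hq, pvStepB_of_some ary F out p p hq2, if_neg (by simp)]
      exact ih (pre ++ [p]) _ out hnd' hd' hF'

-- no index pair occurs twice in the scan
theorem pv_pairs_nodup (n : Int) : (pvPairs n).Nodup := by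
  rw [pvPairs, List.nodup_flatMap]
  constructor
  · intro i _
    exact (PySem.List.nodup_pyRange_one _ _).map (fun a b h => by simpa using congrArg Prod.snd h)
  · refine (PySem.List.pairwise_lt_pyRange_one 0 n).imp (fun {a b} hab => ?_)
    simp only [Function.onFun, List.disjoint_left, List.mem_map]
    rintro x ⟨j, _, rfl⟩ ⟨k, _, hk⟩
    exact absurd (congrArg Prod.fst hk) (by simpa using hab.ne')

-- ===== VERDICT (by name: the statement is the Claim_ definition above) =====
theorem PairFourElementSum_spec : Claim_equal_PairFourElementSum := by
  intro ary _
  unfold Spec_PairFourElementSum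
  rw [pv_A_eq, pv_B_eq]
  refine pv_main ary _ (pvPairs (ary.length : Int)) [] PySem.Dict.empty []
    (by simpa using pv_pairs_nodup (ary.length : Int)) (fun s => by simp) (fun s => ?_)
  rw [pv_firstFold_get? ary _ PySem.Dict.empty s]
  simp
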